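-- pv_equiv track=rewrite | github.com/Rallu25/Fusion-Mind | quizgen/distractors.py | _guess_word_type
-- ===== SOURCE A (Python) =====
-- _NOUN_SUFFIXES = {"tion", "sion", "ment", "ness", "ity", "ance", "ence", "ism",
--                   "ist", "ogy", "ure", "dom", "ship", "hood", "age", "ery"}
--
-- _ADJ_SUFFIXES = {"ous", "ive", "able", "ible", "ful", "less", "ical", "eous",
--                  "ious", "ular", "ary", "ory", "ant", "ent"}
--
-- _VERB_SUFFIXES = {"ate", "ize", "ise", "ify"}
--
-- _ADVERB_SUFFIX = "ly"
--
-- def _guess_word_type(word: str) -> str: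
--     """Guess if a word is noun, adjective, verb, or adverb based on suffix."""
--     w = word.lower()
--     if w.endswith(_ADVERB_SUFFIX) and len(w) > 4:
--         return "adverb"
--     for suf in sorted(_VERB_SUFFIXES, key=len, reverse=True):
--         if w.endswith(suf) and len(w) - len(suf) >= 3:
--             return "verb"
--     for suf in sorted(_ADJ_SUFFIXES, key=len, reverse=True):
--         if w.endswith(suf) and len(w) - len(suf) >= 2:
--             return "adjective"
--     for suf in sorted(_NOUN_SUFFIXES, key=len, reverse=True):
--         if w.endswith(suf) and len(w) - len(suf) >= 2:
--             return "noun"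
--     return "unknown"
-- ===== SOURCE B (Python) =====
-- _SUFFIX_INFO = {"ly": (0, "adverb", 3)}
-- for _suf in ("ate", "ize", "ise", "ify"):
--     _SUFFIX_INFO[_suf] = (1, "verb", 3)
-- for _suf in ("ous", "ive", "able", "ible", "ful", "less", "ical", "eous",
--              "ious", "ular", "ary", "ory", "ant", "ent"):
--     _SUFFIX_INFO[_suf] = (2, "adjective", 2)
-- for _suf in ("tion", "sion", "ment", "ness", "ity", "ance", "ence", "ism",
--              "ist", "ogy", "ure", "dom", "ship", "hood", "age", "ery"):
--     _SUFFIX_INFO[_suf] = (3, "noun", 2)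
--
--
-- def _guess_word_type(word: str) -> str:
--     """Guess if a word is noun, adjective, verb, or adverb based on suffix."""
--     w = word.lower()
--     n = len(w)
--     best = (4, "unknown")
--     for length in (2, 3, 4):
--         info = _SUFFIX_INFO.get(w[-length:])
--         if info is not None and n - length >= info[2] and info[0] < best[0]:
--             best = (info[0], info[1])
--     return best[1]
-- ===== Notes on version B (the rewrite author's own statement) =====
-- stated objective: alternative
-- what changed: Replaces the four per-category early-return endswith scans (with per-call sorted()) by one merged suffix->(priority,label,min-remaining) table built at import time and a single loop over the three slice lengths that keeps the minimum-priority hit.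
import Mathlib
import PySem

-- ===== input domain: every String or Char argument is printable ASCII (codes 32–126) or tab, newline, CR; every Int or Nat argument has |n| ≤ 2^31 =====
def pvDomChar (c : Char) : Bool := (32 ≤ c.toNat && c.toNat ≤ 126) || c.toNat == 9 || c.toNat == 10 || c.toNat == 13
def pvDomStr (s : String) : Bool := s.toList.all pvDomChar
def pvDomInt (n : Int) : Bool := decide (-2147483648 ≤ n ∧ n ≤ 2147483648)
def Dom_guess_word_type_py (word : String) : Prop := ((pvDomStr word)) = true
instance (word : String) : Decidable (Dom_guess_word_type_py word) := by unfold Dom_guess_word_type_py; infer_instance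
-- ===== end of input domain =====

-- B replaces A's per-category early-return endswith scans by ONE merged suffix table
-- mapping each suffix to (priority, label, min remaining length), and a single loop over
-- the three slice lengths taking the minimum-priority hit (alternative decomposition).

-- ===== PORT A =====
-- sorted(_VERB_SUFFIXES, key=len, reverse=True) etc., evaluated once (order within equal
-- lengths is set-iteration order and does not affect the result: the scan only asks
-- whether ANY suffix of the list matches).
def pvVerbSorted : List (List Char) :=
  [['a', 't', 'e'], ['i', 'z', 'e'], ['i', 's', 'e'], ['i', 'f', 'y']]

def pvAdjSorted : List (List Char) :=
  [['a', 'b', 'l', 'e'], ['i', 'b', 'l', 'e'], ['l', 'e', 's', 's'], ['i', 'c', 'a', 'l'],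
   ['e', 'o', 'u', 's'], ['i', 'o', 'u', 's'], ['u', 'l', 'a', 'r'],
   ['o', 'u', 's'], ['i', 'v', 'e'], ['f', 'u', 'l'], ['a', 'r', 'y'], ['o', 'r', 'y'],
   ['a', 'n', 't'], ['e', 'n', 't']]

def pvNounSorted : List (List Char) :=
  [['t', 'i', 'o', 'n'], ['s', 'i', 'o', 'n'], ['m', 'e', 'n', 't'], ['n', 'e', 's', 's'],
   ['a', 'n', 'c', 'e'], ['e', 'n', 'c', 'e'], ['s', 'h', 'i', 'p'], ['h', 'o', 'o', 'd'],
   ['i', 't', 'y'], ['i', 's', 'm'], ['i', 's', 't'], ['o', 'g', 'y'], ['u', 'r', 'e'],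
   ['d', 'o', 'm'], ['a', 'g', 'e'], ['e', 'r', 'y']]

-- the for-loop 'for suf in …: if w.endswith(suf) and len(w) - len(suf) >= md: return …'
def pvScanA (w : List Char) (md : Int) : List (List Char) → Bool
  | [] => false
  | suf :: rest =>
      if PySem.Chars.endswith w suf && decide ((w.length : Int) - suf.length ≥ md) then true
      else pvScanA w md rest

def guess_word_type_py (word : String) : String :=
  let w := PySem.Chars.lower word.toList
  if PySem.Chars.endswith w ['l', 'y'] && decide ((w.length : Int) > 4) then "adverb"
  else if pvScanA w 3 pvVerbSorted then "verb"
  else if pvScanA w 2 pvAdjSorted then "adjective"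
  else if pvScanA w 2 pvNounSorted then "noun"
  else "unknown"

-- ===== PORT B =====
-- _SUFFIX_INFO: the module-level dict Source B builds by inserting fresh keys in this exact
-- order (ly, then the verb, adjective and noun suffixes); suffix -> (priority, label,
-- minimum remaining length).
def pvInfoDict : PySem.Dict (List Char) (Int × String × Int) :=
  PySem.Dict.ofList
    [(['l', 'y'], (0, "adverb", 3)),
     (['a', 't', 'e'], (1, "verb", 3)), (['i', 'z', 'e'], (1, "verb", 3)),
     (['i', 's', 'e'], (1, "verb", 3)), (['i', 'f', 'y'], (1, "verb", 3)),
     (['o', 'u', 's'], (2, "adjective", 2)), (['i', 'v', 'e'], (2, "adjective", 2)),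
     (['a', 'b', 'l', 'e'], (2, "adjective", 2)), (['i', 'b', 'l', 'e'], (2, "adjective", 2)),
     (['f', 'u', 'l'], (2, "adjective", 2)), (['l', 'e', 's', 's'], (2, "adjective", 2)),
     (['i', 'c', 'a', 'l'], (2, "adjective", 2)), (['e', 'o', 'u', 's'], (2, "adjective", 2)),
     (['i', 'o', 'u', 's'], (2, "adjective", 2)), (['u', 'l', 'a', 'r'], (2, "adjective", 2)),
     (['a', 'r', 'y'], (2, "adjective", 2)), (['o', 'r', 'y'], (2, "adjective", 2)),
     (['a', 'n', 't'], (2, "adjective", 2)), (['e', 'n', 't'], (2, "adjective", 2)),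
     (['t', 'i', 'o', 'n'], (3, "noun", 2)), (['s', 'i', 'o', 'n'], (3, "noun", 2)),
     (['m', 'e', 'n', 't'], (3, "noun", 2)), (['n', 'e', 's', 's'], (3, "noun", 2)),
     (['i', 't', 'y'], (3, "noun", 2)), (['a', 'n', 'c', 'e'], (3, "noun", 2)),
     (['e', 'n', 'c', 'e'], (3, "noun", 2)), (['i', 's', 'm'], (3, "noun", 2)),
     (['i', 's', 't'], (3, "noun", 2)), (['o', 'g', 'y'], (3, "noun", 2)),
     (['u', 'r', 'e'], (3, "noun", 2)), (['d', 'o', 'm'], (3, "noun", 2)),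
     (['s', 'h', 'i', 'p'], (3, "noun", 2)), (['h', 'o', 'o', 'd'], (3, "noun", 2)),
     (['a', 'g', 'e'], (3, "noun", 2)), (['e', 'r', 'y'], (3, "noun", 2))]

-- loop body: info = _SUFFIX_INFO.get(w[-length:]);
--            if info is not None and n - length >= info[2] and info[0] < best[0]: best = …
def pvBestStep (w : List Char) (n : Int) (best : Int × String) (L : Int) : Int × String :=
  match PySem.Dict.get? pvInfoDict (PySem.Chars.slice w (some (-L)) none) with
  | some info =>
      if decide (n - L ≥ info.2.2) && decide (info.1 < best.1) then (info.1, info.2.1) else best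
  | none => best

def guess_word_type_py_alt (word : String) : String :=
  let w := PySem.Chars.lower word.toList
  let n : Int := w.length
  (([2, 3, 4] : List Int).foldl (pvBestStep w n) (4, "unknown")).2

-- ===== PRECONDITION & SPEC =====
def Spec_guess_word_type_py (word : String) (out : String) : Prop := out = guess_word_type_py_alt word
instance (word : String) (out : String) : Decidable (Spec_guess_word_type_py word out) := by unfold Spec_guess_word_type_py; infer_instance

-- ===== CLAIM (what is proved, stated in full; the proofs are below) =====
def Claim_equal_guess_word_type_py : Prop := ∀ (word : String), Dom_guess_word_type_py word → Spec_guess_word_type_py word (guess_word_type_py word)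

-- ===== LEMMAS AND PROOFS =====

-- the category key sets, split by suffix length (proof-side abbreviations)
def pvVK : List (List Char) :=
  [['a', 't', 'e'], ['i', 'z', 'e'], ['i', 's', 'e'], ['i', 'f', 'y']]
def pvA3K : List (List Char) :=
  [['o', 'u', 's'], ['i', 'v', 'e'], ['f', 'u', 'l'], ['a', 'r', 'y'], ['o', 'r', 'y'],
   ['a', 'n', 't'], ['e', 'n', 't']]
def pvA4K : List (List Char) :=
  [['a', 'b', 'l', 'e'], ['i', 'b', 'l', 'e'], ['l', 'e', 's', 's'], ['i', 'c', 'a', 'l'],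
   ['e', 'o', 'u', 's'], ['i', 'o', 'u', 's'], ['u', 'l', 'a', 'r']]
def pvN3K : List (List Char) :=
  [['i', 't', 'y'], ['i', 's', 'm'], ['i', 's', 't'], ['o', 'g', 'y'], ['u', 'r', 'e'],
   ['d', 'o', 'm'], ['a', 'g', 'e'], ['e', 'r', 'y']]
def pvN4K : List (List Char) :=
  [['t', 'i', 'o', 'n'], ['s', 'i', 'o', 'n'], ['m', 'e', 'n', 't'], ['n', 'e', 's', 's'],
   ['a', 'n', 'c', 'e'], ['e', 'n', 'c', 'e'], ['s', 'h', 'i', 'p'], ['h', 'o', 'o', 'd']]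

-- Python's w[-L:] (L ≥ 1) is the last min(L, len w) characters
theorem pvSliceNeg (w : List Char) (L : Nat) (h : 1 ≤ L) :
    PySem.List.slice w (some (-(L : Int))) none = w.drop (w.length - L) := by
  simp only [PySem.List.slice, PySem.List.clampIdx]
  split_ifs with h1 h2
  · have h3 : w.length - L = 0 := by omega
    simp [h3]
  · have h3 : ((w.length : Int) + -(L : Int)).toNat = w.length - L := by omega
    rw [h3, List.take_of_length_le (by simp)]
  · omega

-- w.endswith(suf) is the drop-suffix equality test
theorem pvEndswithEqDrop (w suf : List Char) :
    PySem.Chars.endswith w suf = decide (w.drop (w.length - suf.length) = suf) := by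
  rw [Bool.eq_iff_iff, PySem.Chars.endswith_iff, decide_eq_true_iff,
    List.suffix_iff_eq_drop]
  exact eq_comm

-- the merged dict lookup, characterized as four membership tests
theorem pvGetChar (k : List Char) :
    PySem.Dict.get? pvInfoDict k =
      if k = ['l', 'y'] then some (0, "adverb", 3)
      else if k ∈ pvVK then some (1, "verb", 3)
      else if k ∈ pvA3K ∨ k ∈ pvA4K then some (2, "adjective", 2)
      else if k ∈ pvN3K ∨ k ∈ pvN4K then some (3, "noun", 2)
      else none := by
  have hk : pvInfoDict.keys =
      [['l', 'y'],
       ['a', 't', 'e'], ['i', 'z', 'e'], ['i', 's', 'e'], ['i', 'f', 'y'],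
       ['o', 'u', 's'], ['i', 'v', 'e'], ['a', 'b', 'l', 'e'], ['i', 'b', 'l', 'e'],
       ['f', 'u', 'l'], ['l', 'e', 's', 's'], ['i', 'c', 'a', 'l'], ['e', 'o', 'u', 's'],
       ['i', 'o', 'u', 's'], ['u', 'l', 'a', 'r'], ['a', 'r', 'y'], ['o', 'r', 'y'],
       ['a', 'n', 't'], ['e', 'n', 't'],
       ['t', 'i', 'o', 'n'], ['s', 'i', 'o', 'n'], ['m', 'e', 'n', 't'], ['n', 'e', 's', 's'],
       ['i', 't', 'y'], ['a', 'n', 'c', 'e'], ['e', 'n', 'c', 'e'], ['i', 's', 'm'],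
       ['i', 's', 't'], ['o', 'g', 'y'], ['u', 'r', 'e'], ['d', 'o', 'm'],
       ['s', 'h', 'i', 'p'], ['h', 'o', 'o', 'd'], ['a', 'g', 'e'], ['e', 'r', 'y']] := by
    decide
  by_cases hm : k ∈ pvInfoDict.keys
  · rw [hk] at hm
    simp only [List.mem_cons, List.not_mem_nil, or_false] at hm
    rcases hm with rfl|rfl|rfl|rfl|rfl|rfl|rfl|rfl|rfl|rfl|rfl|rfl|rfl|rfl|rfl|rfl|rfl|rfl|rfl|rfl|rfl|rfl|rfl|rfl|rfl|rfl|rfl|rfl|rfl|rfl|rfl|rfl|rfl|rfl|rfl <;> decide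
  · rw [(PySem.Dict.get?_eq_none_iff_not_mem_keys _ _).mpr hm]
    rw [hk] at hm
    simp only [List.mem_cons, List.not_mem_nil, or_false, not_or] at hm
    simp only [pvVK, pvA3K, pvA4K, pvN3K, pvN4K, List.mem_cons, List.not_mem_nil, or_false]
    simp_all

-- A's three sorted-scan loops, as membership of the length-3 / length-4 tail
theorem pvVerbEq (w : List Char) :
    pvScanA w 3 pvVerbSorted
      = (decide (w.drop (w.length - 3) ∈ pvVK) && decide ((w.length : Int) - 3 ≥ 3)) := by
  simp only [pvScanA, pvVerbSorted, pvEndswithEqDrop, pvVK, List.mem_cons, List.not_mem_nil,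
    or_false, List.length_cons, List.length_nil]
  by_cases h : ((w.length : Int) - 3 ≥ 3) <;> simp [h]

theorem pvAdjEq (w : List Char) :
    pvScanA w 2 pvAdjSorted
      = ((decide (w.drop (w.length - 4) ∈ pvA4K) && decide ((w.length : Int) - 4 ≥ 2)) ||
         (decide (w.drop (w.length - 3) ∈ pvA3K) && decide ((w.length : Int) - 3 ≥ 2))) := by
  simp only [pvScanA, pvAdjSorted, pvEndswithEqDrop, pvA4K, pvA3K, List.mem_cons,
    List.not_mem_nil, or_false, List.length_cons, List.length_nil]
  by_cases h4 : ((w.length : Int) - 4 ≥ 2) <;> by_cases h3 : ((w.length : Int) - 3 ≥ 2) <;>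
    (rw [Bool.eq_iff_iff]; simp [h3, h4]; try tauto)

theorem pvNounEq (w : List Char) :
    pvScanA w 2 pvNounSorted
      = ((decide (w.drop (w.length - 4) ∈ pvN4K) && decide ((w.length : Int) - 4 ≥ 2)) ||
         (decide (w.drop (w.length - 3) ∈ pvN3K) && decide ((w.length : Int) - 3 ≥ 2))) := by
  simp only [pvScanA, pvNounSorted, pvEndswithEqDrop, pvN4K, pvN3K, List.mem_cons,
    List.not_mem_nil, or_false, List.length_cons, List.length_nil]
  by_cases h4 : ((w.length : Int) - 4 ≥ 2) <;> by_cases h3 : ((w.length : Int) - 3 ≥ 2) <;>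
    (rw [Bool.eq_iff_iff]; simp [h3, h4]; try tauto)

theorem pvSlice (w : List Char) (L : Nat) (h : 1 ≤ L) :
    PySem.Chars.slice w (some (-(L : Int))) none = w.drop (w.length - L) := by
  rw [PySem.Chars.slice_eq_listSlice]; exact pvSliceNeg w L h

-- loop iteration length = 2: only 'ly' can match a tail of at most two characters
theorem pvStep2 (w : List Char) (b : Int × String) :
    pvBestStep w (w.length : Int) b 2 =
      if w.drop (w.length - 2) = ['l', 'y'] ∧ (w.length : Int) - 2 ≥ 3 ∧ 0 < b.1
      then (0, "adverb") else b := by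
  have hlen : (w.drop (w.length - 2)).length ≤ 2 := by
    simp [List.length_drop]; omega
  have hV : w.drop (w.length - 2) ∉ pvVK := fun h => by
    have := (show ∀ x ∈ pvVK, x.length = 3 by decide) _ h; omega
  have hA : ¬(w.drop (w.length - 2) ∈ pvA3K ∨ w.drop (w.length - 2) ∈ pvA4K) := by
    rintro (h | h)
    · exact absurd ((show ∀ x ∈ pvA3K, x.length = 3 by decide) _ h) (by omega)
    · exact absurd ((show ∀ x ∈ pvA4K, x.length = 4 by decide) _ h) (by omega)
  have hN : ¬(w.drop (w.length - 2) ∈ pvN3K ∨ w.drop (w.length - 2) ∈ pvN4K) := by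
    rintro (h | h)
    · exact absurd ((show ∀ x ∈ pvN3K, x.length = 3 by decide) _ h) (by omega)
    · exact absurd ((show ∀ x ∈ pvN4K, x.length = 4 by decide) _ h) (by omega)
  unfold pvBestStep
  rw [show ((-2 : Int)) = -((2 : Nat) : Int) by norm_num, pvSlice w 2 (by omega), pvGetChar]
  by_cases h1 : w.drop (w.length - 2) = ['l', 'y'] <;> simp [h1, hV, hA, hN]

-- loop iteration length = 3
theorem pvStep3 (w : List Char) (b : Int × String) :
    pvBestStep w (w.length : Int) b 3 =
      if w.drop (w.length - 3) = ['l', 'y'] ∧ (w.length : Int) - 3 ≥ 3 ∧ 0 < b.1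
      then (0, "adverb")
      else if w.drop (w.length - 3) ∈ pvVK ∧ (w.length : Int) - 3 ≥ 3 ∧ 1 < b.1
      then (1, "verb")
      else if (w.drop (w.length - 3) ∈ pvA3K ∨ w.drop (w.length - 3) ∈ pvA4K) ∧
              (w.length : Int) - 3 ≥ 2 ∧ 2 < b.1
      then (2, "adjective")
      else if (w.drop (w.length - 3) ∈ pvN3K ∨ w.drop (w.length - 3) ∈ pvN4K) ∧
              (w.length : Int) - 3 ≥ 2 ∧ 3 < b.1
      then (3, "noun") else b := by
  unfold pvBestStep
  rw [show ((-3 : Int)) = -((3 : Nat) : Int) by norm_num, pvSlice w 3 (by omega), pvGetChar]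
  by_cases h1 : w.drop (w.length - 3) = ['l', 'y']
  · simp [h1, pvVK, pvA3K, pvA4K, pvN3K, pvN4K]
  by_cases h2 : w.drop (w.length - 3) ∈ pvVK
  · have hd := (show ∀ x ∈ pvVK, x ∉ pvA3K ∧ x ∉ pvA4K ∧ x ∉ pvN3K ∧ x ∉ pvN4K by decide) _ h2
    simp [h1, h2, hd.1, hd.2.1, hd.2.2.1, hd.2.2.2]
  by_cases h3 : w.drop (w.length - 3) ∈ pvA3K ∨ w.drop (w.length - 3) ∈ pvA4K
  · have hd : w.drop (w.length - 3) ∉ pvN3K ∧ w.drop (w.length - 3) ∉ pvN4K := by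
      rcases h3 with h | h
      · exact (show ∀ x ∈ pvA3K, x ∉ pvN3K ∧ x ∉ pvN4K by decide) _ h
      · exact (show ∀ x ∈ pvA4K, x ∉ pvN3K ∧ x ∉ pvN4K by decide) _ h
    simp [h1, h2, h3, hd.1, hd.2]
  by_cases h4 : w.drop (w.length - 3) ∈ pvN3K ∨ w.drop (w.length - 3) ∈ pvN4K <;>
    simp [h1, h2, h3, h4]

-- loop iteration length = 4
theorem pvStep4 (w : List Char) (b : Int × String) :
    pvBestStep w (w.length : Int) b 4 =
      if w.drop (w.length - 4) = ['l', 'y'] ∧ (w.length : Int) - 4 ≥ 3 ∧ 0 < b.1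
      then (0, "adverb")
      else if w.drop (w.length - 4) ∈ pvVK ∧ (w.length : Int) - 4 ≥ 3 ∧ 1 < b.1
      then (1, "verb")
      else if (w.drop (w.length - 4) ∈ pvA3K ∨ w.drop (w.length - 4) ∈ pvA4K) ∧
              (w.length : Int) - 4 ≥ 2 ∧ 2 < b.1
      then (2, "adjective")
      else if (w.drop (w.length - 4) ∈ pvN3K ∨ w.drop (w.length - 4) ∈ pvN4K) ∧
              (w.length : Int) - 4 ≥ 2 ∧ 3 < b.1
      then (3, "noun") else b := by
  unfold pvBestStep
  rw [show ((-4 : Int)) = -((4 : Nat) : Int) by norm_num, pvSlice w 4 (by omega), pvGetChar]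
  by_cases h1 : w.drop (w.length - 4) = ['l', 'y']
  · simp [h1, pvVK, pvA3K, pvA4K, pvN3K, pvN4K]
  by_cases h2 : w.drop (w.length - 4) ∈ pvVK
  · have hd := (show ∀ x ∈ pvVK, x ∉ pvA3K ∧ x ∉ pvA4K ∧ x ∉ pvN3K ∧ x ∉ pvN4K by decide) _ h2
    simp [h1, h2, hd.1, hd.2.1, hd.2.2.1, hd.2.2.2]
  by_cases h3 : w.drop (w.length - 4) ∈ pvA3K ∨ w.drop (w.length - 4) ∈ pvA4K
  · have hd : w.drop (w.length - 4) ∉ pvN3K ∧ w.drop (w.length - 4) ∉ pvN4K := by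
      rcases h3 with h | h
      · exact (show ∀ x ∈ pvA3K, x ∉ pvN3K ∧ x ∉ pvN4K by decide) _ h
      · exact (show ∀ x ∈ pvA4K, x ∉ pvN3K ∧ x ∉ pvN4K by decide) _ h
    simp [h1, h2, h3, hd.1, hd.2]
  by_cases h4 : w.drop (w.length - 4) ∈ pvN3K ∨ w.drop (w.length - 4) ∈ pvN4K <;>
    simp [h1, h2, h3, h4]

-- ===== VERDICT (by name: the statement is the Claim_ definition above) =====
theorem guess_word_type_py_spec : Claim_equal_guess_word_type_py := by
  intro word _
  unfold Spec_guess_word_type_py guess_word_type_py guess_word_type_py_alt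
  simp only [List.foldl_cons, List.foldl_nil, pvStep2, pvStep3, pvStep4,
    pvVerbEq, pvAdjEq, pvNounEq, pvEndswithEqDrop, List.length_cons, List.length_nil]
  generalize PySem.Chars.lower word.toList = w
  have h3A4 : w.drop (w.length - 3) ∉ pvA4K := fun h => by
    have hx := (show ∀ x ∈ pvA4K, x.length = 4 by decide) _ h
    have hy : (w.drop (w.length - 3)).length = w.length - (w.length - 3) := by simp
    omega
  have h3N4 : w.drop (w.length - 3) ∉ pvN4K := fun h => by
    have hx := (show ∀ x ∈ pvN4K, x.length = 4 by decide) _ h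
    have hy : (w.drop (w.length - 3)).length = w.length - (w.length - 3) := by simp
    omega
  by_cases h5 : 5 ≤ w.length
  · by_cases h6 : 6 ≤ w.length
    · -- n ≥ 6: every slice has its nominal length
      have h3ly : w.drop (w.length - 3) ≠ ['l', 'y'] := fun h => by
        have hy : (w.drop (w.length - 3)).length = w.length - (w.length - 3) := by simp
        rw [h] at hy; simp at hy; omega
      have h4ly : w.drop (w.length - 4) ≠ ['l', 'y'] := fun h => by
        have hy : (w.drop (w.length - 4)).length = w.length - (w.length - 4) := by simp
        rw [h] at hy; simp at hy; omega
      have h4V : w.drop (w.length - 4) ∉ pvVK := fun h => by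
        have hx := (show ∀ x ∈ pvVK, x.length = 3 by decide) _ h
        have hy : (w.drop (w.length - 4)).length = w.length - (w.length - 4) := by simp
        omega
      have h4A3 : w.drop (w.length - 4) ∉ pvA3K := fun h => by
        have hx := (show ∀ x ∈ pvA3K, x.length = 3 by decide) _ h
        have hy : (w.drop (w.length - 4)).length = w.length - (w.length - 4) := by simp
        omega
      have h4N3 : w.drop (w.length - 4) ∉ pvN3K := fun h => by
        have hx := (show ∀ x ∈ pvN3K, x.length = 3 by decide) _ h
        have hy : (w.drop (w.length - 4)).length = w.length - (w.length - 4) := by simp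
        omega
      have g1 : (3 : Int) ≤ (w.length : Int) - 2 := by omega
      have g2 : (3 : Int) ≤ (w.length : Int) - 3 := by omega
      have g3 : (2 : Int) ≤ (w.length : Int) - 3 := by omega
      have g4 : (2 : Int) ≤ (w.length : Int) - 4 := by omega
      have g5 : (4 : Int) < (w.length : Int) := by omega
      by_cases h2 : w.drop (w.length - 2) = ['l', 'y']
      · simp [h2, g1, g5]
      by_cases h3v : w.drop (w.length - 3) ∈ pvVK
      · simp [h2, h3v, h3ly, h4ly, h4V, g1, g2, g5]
      by_cases h3a : w.drop (w.length - 3) ∈ pvA3K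
      · simp [h2, h3v, h3a, h3ly, h3A4, h4ly, h4V, h4A3, g1, g2, g3, g5]
      by_cases h3n : w.drop (w.length - 3) ∈ pvN3K
      · by_cases h4a : w.drop (w.length - 4) ∈ pvA4K
        · simp [h2, h3v, h3a, h3n, h3ly, h3A4, h4a, h4ly, h4V, h4A3, g1, g2, g3, g4, g5]
        · simp [h2, h3v, h3a, h3n, h3ly, h3A4, h3N4, h4a, h4ly, h4V, h4A3, h4N3,
            g1, g2, g3, g4, g5]
      · by_cases h4a : w.drop (w.length - 4) ∈ pvA4K
        · simp [h2, h3v, h3a, h3n, h3ly, h3A4, h3N4, h4a, h4ly, h4V, h4A3, g1, g2, g3, g4, g5]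
        by_cases h4n : w.drop (w.length - 4) ∈ pvN4K
        · simp [h2, h3v, h3a, h3n, h3ly, h3A4, h3N4, h4a, h4n, h4ly, h4V, h4A3, h4N3,
            g1, g2, g3, g4, g5]
        · simp [h2, h3v, h3a, h3n, h3ly, h3A4, h3N4, h4a, h4n, h4ly, h4V, h4A3, h4N3,
            g1, g2, g3, g4, g5]
    · -- n = 5: only the 'ly' test and the length-3 suffixes can fire
      have h3ly : w.drop (w.length - 3) ≠ ['l', 'y'] := fun h => by
        have hy : (w.drop (w.length - 3)).length = w.length - (w.length - 3) := by simp
        rw [h] at hy; simp at hy; omega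
      have g1 : (3 : Int) ≤ (w.length : Int) - 2 := by omega
      have g2 : ¬((3 : Int) ≤ (w.length : Int) - 3) := by omega
      have g3 : (2 : Int) ≤ (w.length : Int) - 3 := by omega
      have g4 : ¬((2 : Int) ≤ (w.length : Int) - 4) := by omega
      have g4' : ¬((3 : Int) ≤ (w.length : Int) - 4) := by omega
      have g5 : (4 : Int) < (w.length : Int) := by omega
      by_cases h2 : w.drop (w.length - 2) = ['l', 'y']
      · simp [h2, g1, g5]
      by_cases h3a : w.drop (w.length - 3) ∈ pvA3K
      · simp [h2, h3a, h3ly, h3A4, g1, g2, g3, g4, g4', g5]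
      by_cases h3n : w.drop (w.length - 3) ∈ pvN3K
      · simp [h2, h3a, h3n, h3ly, h3A4, h3N4, g1, g2, g3, g4, g4', g5]
      · simp [h2, h3a, h3n, h3ly, h3A4, h3N4, g1, g2, g3, g4, g4', g5]
  · -- n ≤ 4: nothing can fire, both sides return "unknown"
    simp [show ¬((3 : Int) ≤ (w.length : Int) - 2) from by omega,
      show ¬((3 : Int) ≤ (w.length : Int) - 3) from by omega,
      show ¬((2 : Int) ≤ (w.length : Int) - 3) from by omega,
      show ¬((2 : Int) ≤ (w.length : Int) - 4) from by omega,
      show ¬((3 : Int) ≤ (w.length : Int) - 4) from by omega,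
      show ¬((4 : Int) < (w.length : Int)) from by omega]
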